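-- pv_equiv track=rewrite | github.com/prototyp33/barcelona-housing-demographics-analyzer | .github/scripts/project_automation.py | detect_impact_from_labels
-- ===== SOURCE A (Python) =====
-- def detect_impact_from_labels(labels: list) -> str:
--     """Detecta el impacto desde los labels del issue."""
--     label_names = [label.get("name", "").lower() for label in labels]
--
--     if any("critical" in label or "high" in label for label in label_names):
--         return "High"
--     elif any("medium" in label for label in label_names):
--         return "Medium"
--     else:
--         return "Low"
-- ===== SOURCE B (Python) =====
-- _LEVELS = ("Low", "Medium", "High")
--
--
-- def _label_score(label) -> int:
--     """Numeric severity of a single label: 2 = high, 1 = medium, 0 = none."""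
--     name = label.get("name", "").lower()
--     if "critical" in name or "high" in name:
--         return 2
--     if "medium" in name:
--         return 1
--     return 0
--
--
-- def detect_impact_from_labels(labels: list) -> str:
--     """Detecta el impacto desde los labels del issue."""
--     score = 0
--     for label in labels:
--         s = _label_score(label)
--         if s > score:
--             score = s
--             if score == 2:
--                 break
--     return _LEVELS[score]
-- ===== Notes on version B (the rewrite author's own statement) =====
-- stated objective: alternative
-- what changed: Replaces the staged any()-scan classification with a numeric severity scoring: each label is mapped to a score (2/1/0), a single loop keeps the running maximum with an early break once the top score is reached, and the result is looked up in a level table indexed by the score.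
import Mathlib
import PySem

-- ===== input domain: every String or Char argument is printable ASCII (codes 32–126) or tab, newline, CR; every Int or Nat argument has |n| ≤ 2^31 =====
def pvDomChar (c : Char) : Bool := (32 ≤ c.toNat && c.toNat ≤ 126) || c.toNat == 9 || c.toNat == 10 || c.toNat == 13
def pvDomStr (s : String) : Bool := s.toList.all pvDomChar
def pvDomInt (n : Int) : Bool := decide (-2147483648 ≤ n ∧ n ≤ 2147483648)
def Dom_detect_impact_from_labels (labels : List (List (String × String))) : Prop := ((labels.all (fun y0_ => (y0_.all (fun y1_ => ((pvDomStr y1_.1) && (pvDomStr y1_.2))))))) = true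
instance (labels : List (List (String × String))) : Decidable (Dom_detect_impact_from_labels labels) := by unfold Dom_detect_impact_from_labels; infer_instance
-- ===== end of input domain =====

-- B replaces A's staged any()-scan classification by numeric severity scoring: a single loop keeps the
-- running maximum label score (2/1/0) with an early break at the top score, then indexes a level table.


-- ===== PORT A =====
def detect_impact_from_labels (labels : List (List (String × String))) : String :=
  let label_names := labels.map (fun label => PySem.Str.lower (PySem.Dict.getD (PySem.Dict.mk label) "name" ""))
  if label_names.any (fun l => PySem.Str.isIn "critical" l || PySem.Str.isIn "high" l) then "High"
  else if label_names.any (fun l => PySem.Str.isIn "medium" l) then "Medium"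
  else "Low"

-- ===== PORT B =====
-- name = label.get("name", "").lower()  (the local binding of Source B's _label_score, as a helper)
def labelName (label : List (String × String)) : String :=
  PySem.Str.lower (PySem.Dict.getD (PySem.Dict.mk label) "name" "")

-- _label_score: numeric severity of a single label (2 = high, 1 = medium, 0 = none)
def labelScore (label : List (String × String)) : Nat :=
  if PySem.Str.isIn "critical" (labelName label) || PySem.Str.isIn "high" (labelName label) then 2
  else if PySem.Str.isIn "medium" (labelName label) then 1
  else 0

-- the for-loop with early break, as structural recursion on the label list
def scoreLoop : List (List (String × String)) → Nat → Nat
  | [], score => score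
  | label :: rest, score =>
    let s := labelScore label
    if s > score then
      if s == 2 then s else scoreLoop rest s
    else scoreLoop rest score

def detect_impact_from_labels_alt (labels : List (List (String × String))) : String :=
  -- _LEVELS[score]: the score is always 0, 1 or 2, so the indexing is exact
  (["Low", "Medium", "High"] : List String).getD (scoreLoop labels 0) ""

-- ===== PRECONDITION & SPEC =====
def Spec_detect_impact_from_labels (labels : List (List (String × String))) (out : String) : Prop := out = detect_impact_from_labels_alt labels
instance (labels : List (List (String × String))) (out : String) : Decidable (Spec_detect_impact_from_labels labels out) := by unfold Spec_detect_impact_from_labels; infer_instance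

-- ===== CLAIM (what is proved, stated in full; the proofs are below) =====
def Claim_equal_detect_impact_from_labels : Prop := ∀ (labels : List (List (String × String))), Dom_detect_impact_from_labels labels → Spec_detect_impact_from_labels labels (detect_impact_from_labels labels)

-- ===== LEMMAS AND PROOFS =====

def hiB (l : List (String × String)) : Bool :=
  PySem.Str.isIn "critical" (labelName l) || PySem.Str.isIn "high" (labelName l)

def medB (l : List (String × String)) : Bool :=
  PySem.Str.isIn "medium" (labelName l)

def baseScore (labels : List (List (String × String))) : Nat :=
  if labels.any (fun l => labelScore l == 2) then 2
  else if labels.any (fun l => labelScore l == 1) then 1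
  else 0

lemma labelScore_le (l : List (String × String)) : labelScore l ≤ 2 := by
  unfold labelScore; split_ifs <;> omega

lemma baseScore_le (labels : List (List (String × String))) : baseScore labels ≤ 2 := by
  unfold baseScore; split_ifs <;> omega

lemma ls2 (l : List (String × String)) : (labelScore l == 2) = hiB l := by
  unfold labelScore hiB
  split_ifs with h1 h2
  · rw [h1]; rfl
  · rw [eq_false_of_ne_true h1]; rfl
  · rw [eq_false_of_ne_true h1]; rfl


lemma ls1 (l : List (String × String)) : (labelScore l == 1) = (!hiB l && medB l) := by
  unfold labelScore hiB medB
  split_ifs with h1 h2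
  · rw [h1]; simp
  · rw [eq_false_of_ne_true h1, h2]; rfl
  · rw [eq_false_of_ne_true h1, eq_false_of_ne_true h2]; simp

lemma baseScore_cons (l : List (String × String)) (ls : List (List (String × String))) :
    baseScore (l :: ls) = max (labelScore l) (baseScore ls) := by
  unfold baseScore
  simp only [List.any_cons, Bool.or_eq_true, beq_iff_eq]
  have hl := labelScore_le l
  split_ifs <;> simp_all <;> omega

lemma scoreLoop_eq (labels : List (List (String × String))) :
    ∀ s, s ≤ 2 → scoreLoop labels s = max s (baseScore labels) := by
  induction labels with
  | nil => intro s _; simp [scoreLoop, baseScore]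
  | cons l ls ih =>
    intro s hs
    have hl := labelScore_le l
    have hb := baseScore_le ls
    rw [baseScore_cons]
    simp only [scoreLoop]
    split_ifs with hgt h2
    · have h2' : labelScore l = 2 := by simpa using h2
      omega
    · rw [ih _ hl]; omega
    · rw [ih s hs]; omega

lemma any_and_not (labels : List (List (String × String)))
    (h : labels.any (fun l => hiB l) = false) :
    labels.any (fun l => !hiB l && medB l) = labels.any (fun l => medB l) := by
  induction labels with
  | nil => rfl
  | cons a as ih => simp_all [List.any_cons]

-- ===== VERDICT (by name: the statement is the Claim_ definition above) =====
theorem detect_impact_from_labels_spec : Claim_equal_detect_impact_from_labels := by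
  intro labels _
  unfold Spec_detect_impact_from_labels
  have hA : detect_impact_from_labels labels =
      (if labels.any (fun l => hiB l) then "High"
       else if labels.any (fun l => medB l) then "Medium" else "Low") := by
    unfold detect_impact_from_labels hiB medB labelName
    simp [List.any_map]
  rw [hA]
  unfold detect_impact_from_labels_alt
  rw [scoreLoop_eq labels 0 (by omega)]
  unfold baseScore
  simp only [ls2, ls1]
  by_cases hH : labels.any (fun l => hiB l) = true
  · simp [hH]
  · have hH' : labels.any (fun l => hiB l) = false := by simpa using hH
    rw [any_and_not labels hH']
    by_cases hM : labels.any (fun l => medB l) = true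
    · simp [hH', hM]
    · have hM' : labels.any (fun l => medB l) = false := by simpa using hM
      simp [hH', hM']
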